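-- pv_equiv track=rewrite | github.com/MAbdullahAhmad/email-scraper | tools/1-python-approach-V2/core/util/functions/email_extractor.py | is_main_email
-- ===== SOURCE A (Python) =====
-- def is_main_email(email):
--     """
--     Check if the email is a "main" email (generic address).
--
--     Args:
--         email: Email address to check
--
--     Returns:
--         True if it's a main email, False otherwise
--     """
--     # List of common generic email prefixes
--     generic_prefixes = [
--         'info', 'contact', 'sales', 'admin', 'support', 'hello',
--         'office', 'mail', 'enquiry', 'enquiries', 'help',
--         'service', 'services', 'careers', 'jobs', 'hr',
--         'marketing', 'media', 'press', 'general', 'webmaster',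
--         'no-reply', 'noreply', 'no_reply', 'customerservice',
--         'feedback', 'inquiry', 'inquiries', 'team', 'info',
--         # Add more domain-specific prefixes
--         'gcc', 'dcc', 'uae', 'dubai', 'abudhabi', 'sharjah',
--         'projects', 'contracts', 'procurement', 'business',
--         'reception', 'frontdesk', 'query', 'queries'
--     ]
--
--     # Get the username part (before @)
--     username = email.split('@')[0].lower()
--
--     # Check if the username is a generic prefix or contains only the domain name
--     for prefix in generic_prefixes:
--         if username == prefix or username.startswith(prefix + '.'):
--             return True
--
--     # If it contains dots or appears to be a personal name, it's likely not a main email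
--     if '.' in username and not any(username.startswith(prefix) for prefix in generic_prefixes):
--         return False
--
--     return True
-- ===== SOURCE B (Python) =====
-- GENERIC_PREFIXES = frozenset([
--     'info', 'contact', 'sales', 'admin', 'support', 'hello',
--     'office', 'mail', 'enquiry', 'enquiries', 'help',
--     'service', 'services', 'careers', 'jobs', 'hr',
--     'marketing', 'media', 'press', 'general', 'webmaster',
--     'no-reply', 'noreply', 'no_reply', 'customerservice',
--     'feedback', 'inquiry', 'inquiries', 'team',
--     'gcc', 'dcc', 'uae', 'dubai', 'abudhabi', 'sharjah',
--     'projects', 'contracts', 'procurement', 'business',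
--     'reception', 'frontdesk', 'query', 'queries'
-- ])
--
--
-- def is_main_email(email):
--     username = email.split('@')[0].lower()
--     if '.' not in username:
--         return True
--     # Inverted scan: instead of testing each listed prefix against the
--     # username, enumerate the username's own initial segments and look
--     # each one up in a hash set of generic prefixes.
--     return any(username[:k] in GENERIC_PREFIXES
--                for k in range(1, len(username) + 1))
-- ===== Notes on version B (the rewrite author's own statement) =====
-- stated objective: alternative
-- what changed: B inverts the scan: instead of testing each listed prefix against the username (A's two startswith loops plus a dot branch), B enumerates the username's own initial segments username[:k] and looks each up in a frozenset of generic prefixes, after an early return when the username has no dot.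
import Mathlib
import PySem

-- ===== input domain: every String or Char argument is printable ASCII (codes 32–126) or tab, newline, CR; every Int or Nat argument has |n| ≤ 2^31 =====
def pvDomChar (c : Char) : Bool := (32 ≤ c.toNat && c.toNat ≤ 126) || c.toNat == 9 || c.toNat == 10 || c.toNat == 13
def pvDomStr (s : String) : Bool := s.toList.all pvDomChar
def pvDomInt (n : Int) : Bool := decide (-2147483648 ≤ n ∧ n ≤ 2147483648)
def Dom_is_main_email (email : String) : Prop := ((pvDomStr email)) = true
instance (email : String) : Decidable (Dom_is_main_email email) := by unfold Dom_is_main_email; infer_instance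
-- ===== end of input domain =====

-- B inverts A's scan: it enumerates the username's initial segments and looks each up in a set of generic prefixes (alternative decomposition, same observable result).

def pvGenericPrefixes : List String := [
  "info", "contact", "sales", "admin", "support", "hello",
  "office", "mail", "enquiry", "enquiries", "help",
  "service", "services", "careers", "jobs", "hr",
  "marketing", "media", "press", "general", "webmaster",
  "no-reply", "noreply", "no_reply", "customerservice",
  "feedback", "inquiry", "inquiries", "team", "info",
  "gcc", "dcc", "uae", "dubai", "abudhabi", "sharjah",
  "projects", "contracts", "procurement", "business",
  "reception", "frontdesk", "query", "queries"]

-- ===== PORT A =====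
-- A's first loop with early return: true as soon as username == prefix or startswith(prefix + '.')
def pvLoopA (u : String) : List String → Bool
  | [] => false
  | p :: ps => if u == p || PySem.Str.startswith u (p ++ ".") then true else pvLoopA u ps

def is_main_email (email : String) : Bool :=
  -- email.split('@')[0]: splitOn with a nonempty sep always yields ≥ 1 piece, so [0] = headD ""
  let username := PySem.Str.lower (((PySem.Str.split? email "@").getD []).headD "")
  if pvLoopA username pvGenericPrefixes then true
  else if PySem.Str.isIn "." username
          && !(pvGenericPrefixes.any (fun p => PySem.Str.startswith username p)) then false
  else true

-- ===== PORT B =====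
-- frozenset of generic prefixes (same literal elements as A's list)
def pvGenericSet : PySem.Set String := PySem.Set.ofList pvGenericPrefixes

def is_main_email_alt (email : String) : Bool :=
  let username := PySem.Str.lower (((PySem.Str.split? email "@").getD []).headD "")
  if !(PySem.Str.isIn "." username) then true
  else (PySem.List.pyRange 1 (PySem.Str.len username + 1) 1).any
        (fun k => PySem.Set.contains pvGenericSet (PySem.Str.slice username none (some k)))

-- ===== PRECONDITION & SPEC =====
def Spec_is_main_email (email : String) (out : Bool) : Prop := out = is_main_email_alt email
instance (email : String) (out : Bool) : Decidable (Spec_is_main_email email out) := by unfold Spec_is_main_email; infer_instance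

-- ===== CLAIM (what is proved, stated in full; the proofs are below) =====
def Claim_equal_is_main_email : Prop := ∀ (email : String), Dom_is_main_email email → Spec_is_main_email email (is_main_email email)

-- ===== LEMMAS AND PROOFS =====

-- if A's first loop fires, then username starts with some generic prefix
theorem pvLoopA_imp_any (u : String) (ps : List String) (h : pvLoopA u ps = true) :
    ps.any (fun p => PySem.Str.startswith u p) = true := by
  induction ps with
  | nil => simp [pvLoopA] at h
  | cons p ps ih =>
    simp only [pvLoopA] at h
    by_cases hc : (u == p || PySem.Str.startswith u (p ++ ".")) = true
    · rcases Bool.or_eq_true_iff.mp hc with h1 | h2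
      · have : u = p := by simpa using h1
        subst this
        simp [PySem.Str.startswith_eq, PySem.Chars.startswith_iff]
      · have h2' : (p ++ ".").toList <+: u.toList := by
          simpa [PySem.Str.startswith_eq, PySem.Chars.startswith_iff] using h2
        have hp : p.toList <+: (p ++ ".").toList := by
          simp [List.prefix_append]
        have : PySem.Str.startswith u p = true := by
          simpa [PySem.Str.startswith_eq, PySem.Chars.startswith_iff] using hp.trans h2'
        simp only [List.any_cons, Bool.or_eq_true, this, true_or]
    · rw [if_neg hc] at h
      simp only [List.any_cons, Bool.or_eq_true]
      right
      simpa using ih h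

-- every generic prefix is nonempty
theorem pvGenericPrefixes_nonempty : ∀ p ∈ pvGenericPrefixes, 1 ≤ p.toList.length := by decide

-- B's inverted scan over initial segments equals the startswith scan over the prefix list
theorem pvSegments_eq_startswith (u : String) :
    ((PySem.List.pyRange 1 (PySem.Str.len u + 1) 1).any
        (fun k => PySem.Set.contains pvGenericSet (PySem.Str.slice u none (some k))))
      = pvGenericPrefixes.any (fun p => PySem.Str.startswith u p) := by
  have hcont : ∀ s : String, (PySem.Set.contains pvGenericSet s = true) ↔ s ∈ pvGenericPrefixes := by
    intro s
    unfold pvGenericSet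
    exact Iff.trans (PySem.Set.contains_iff _ s) (PySem.Set.mem_ofList _ s)
  apply Bool.eq_iff_iff.mpr
  simp only [List.any_eq_true]
  constructor
  · rintro ⟨k, hk, hc⟩
    rw [PySem.List.mem_pyRange_one] at hk
    obtain ⟨hk1, hk2⟩ := hk
    refine ⟨PySem.Str.slice u none (some k), (hcont _).mp hc, ?_⟩
    have hs : (PySem.Str.slice u none (some k)).toList = u.toList.take k.toNat := by
      simp only [PySem.Str.toList_slice, PySem.Chars.slice_eq_listSlice]
      exact PySem.List.slice_to u.toList (show (0:Int) ≤ k by omega)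
    rw [PySem.Str.startswith_eq, PySem.Chars.startswith_iff, hs]
    exact List.take_prefix _ _
  · rintro ⟨p, hp, hsw⟩
    rw [PySem.Str.startswith_eq, PySem.Chars.startswith_iff] at hsw
    have hlen : p.toList.length ≤ u.toList.length := hsw.length_le
    have h1 : 1 ≤ p.toList.length := pvGenericPrefixes_nonempty p hp
    refine ⟨(p.toList.length : Int), ?_, ?_⟩
    · rw [PySem.List.mem_pyRange_one]
      constructor
      · exact_mod_cast h1
      · have : PySem.Str.len u = (u.toList.length : Int) := by simp [PySem.Str.len_eq]
        rw [this]
        exact_mod_cast Nat.lt_succ_of_le hlen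
    · have hs : (PySem.Str.slice u none (some (p.toList.length : Int))).toList
          = u.toList.take p.toList.length := by
        simp only [PySem.Str.toList_slice, PySem.Chars.slice_eq_listSlice]
        rw [PySem.List.slice_to u.toList (show (0:Int) ≤ (p.toList.length : Int) by positivity)]
        simp
      have htake : u.toList.take p.toList.length = p.toList :=
        (List.prefix_iff_eq_take.mp hsw).symm
      apply (hcont _).mpr
      have : (PySem.Str.slice u none (some (p.toList.length : Int))) = p := by
        apply String.toList_injective
        rw [hs, htake]
      rw [this]
      exact hp

-- ===== VERDICT (by name: the statement is the Claim_ definition above) =====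
theorem is_main_email_spec : Claim_equal_is_main_email := by
  intro email _
  unfold Spec_is_main_email is_main_email is_main_email_alt
  set u := PySem.Str.lower (((PySem.Str.split? email "@").getD []).headD "") with hu
  simp only [pvSegments_eq_startswith]
  by_cases hl : pvLoopA u pvGenericPrefixes = true
  · have h2 := pvLoopA_imp_any u pvGenericPrefixes hl
    simp [hl]
    exact Or.inr (by simpa using h2)
  · simp only [Bool.not_eq_true] at hl
    simp only [hl, Bool.false_eq_true, if_false]
    cases hd : PySem.Str.isIn "." u <;>
      cases ha : pvGenericPrefixes.any (fun p => PySem.Str.startswith u p) <;> simp
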